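-- pv_equiv track=rewrite | github.com/teatimedev/maa-rocky-point-tracker | scraper/utils/feature_parser.py | parse_feature_flags
-- ===== SOURCE A (Python) =====
-- def parse_feature_flags(tags: list[str]) -> dict[str, bool]:
--     normalized = [tag.lower() for tag in tags]
--
--     return {
--         "has_garage": any("garage" in tag for tag in normalized),
--         "has_fireplace": any("fireplace" in tag for tag in normalized),
--         "is_renovated": any("renov" in tag or "upgrade" in tag for tag in normalized),
--         "has_smart_home": any("smart" in tag for tag in normalized),
--         "is_top_floor": any("top floor" in tag for tag in normalized),
--         "has_sunroom": any("sunroom" in tag for tag in normalized),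
--         "has_balcony": any("balcony" in tag for tag in normalized),
--     }
-- ===== SOURCE B (Python) =====
-- def parse_feature_flags(tags: list[str]) -> dict[str, bool]:
--     g = fp = ren = sm = tf = sr = bc = False
--     for tag in tags:
--         low = tag.lower()
--         g = g or "garage" in low
--         fp = fp or "fireplace" in low
--         ren = ren or "renov" in low or "upgrade" in low
--         sm = sm or "smart" in low
--         tf = tf or "top floor" in low
--         sr = sr or "sunroom" in low
--         bc = bc or "balcony" in low
--     return {
--         "has_garage": g,
--         "has_fireplace": fp,
--         "is_renovated": ren,
--         "has_smart_home": sm,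
--         "is_top_floor": tf,
--         "has_sunroom": sr,
--         "has_balcony": bc,
--     }
-- ===== Notes on version B (the rewrite author's own statement) =====
-- stated objective: faster
-- what changed: Replaces A's seven separate any-scans over a prebuilt lowercased copy of the list with a single pass over tags that lowercases each tag once and accumulates all seven flags in local booleans.
import Mathlib
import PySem

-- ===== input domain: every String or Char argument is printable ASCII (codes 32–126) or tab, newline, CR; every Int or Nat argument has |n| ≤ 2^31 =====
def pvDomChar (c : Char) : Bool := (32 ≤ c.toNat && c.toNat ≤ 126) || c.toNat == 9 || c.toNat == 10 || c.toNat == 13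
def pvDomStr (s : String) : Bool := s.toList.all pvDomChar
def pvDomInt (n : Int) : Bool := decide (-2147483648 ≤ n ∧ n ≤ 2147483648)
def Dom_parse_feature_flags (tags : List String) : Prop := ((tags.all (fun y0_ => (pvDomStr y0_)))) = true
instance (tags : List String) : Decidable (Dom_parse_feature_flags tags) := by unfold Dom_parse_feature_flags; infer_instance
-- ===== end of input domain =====

-- B replaces A's seven any-scans over a lowercased copy with one pass over tags accumulating all seven flags.


-- ===== PORT A =====
def parse_feature_flags (tags : List String) : List (String × Bool) :=
  let normalized := tags.map (fun tag => PySem.Str.lower tag)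
  [("has_garage", normalized.any (fun tag => PySem.Str.isIn "garage" tag)),
   ("has_fireplace", normalized.any (fun tag => PySem.Str.isIn "fireplace" tag)),
   ("is_renovated", normalized.any (fun tag => PySem.Str.isIn "renov" tag || PySem.Str.isIn "upgrade" tag)),
   ("has_smart_home", normalized.any (fun tag => PySem.Str.isIn "smart" tag)),
   ("is_top_floor", normalized.any (fun tag => PySem.Str.isIn "top floor" tag)),
   ("has_sunroom", normalized.any (fun tag => PySem.Str.isIn "sunroom" tag)),
   ("has_balcony", normalized.any (fun tag => PySem.Str.isIn "balcony" tag))]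

-- ===== PORT B =====
-- one loop iteration of Source B: lowercase the tag once, or each keyword hit into its flag
def pvStep (st : Bool × Bool × Bool × Bool × Bool × Bool × Bool) (tag : String) :
    Bool × Bool × Bool × Bool × Bool × Bool × Bool :=
  let low := PySem.Str.lower tag
  (st.1 || PySem.Str.isIn "garage" low,
   st.2.1 || PySem.Str.isIn "fireplace" low,
   st.2.2.1 || PySem.Str.isIn "renov" low || PySem.Str.isIn "upgrade" low,
   st.2.2.2.1 || PySem.Str.isIn "smart" low,
   st.2.2.2.2.1 || PySem.Str.isIn "top floor" low,
   st.2.2.2.2.2.1 || PySem.Str.isIn "sunroom" low,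
   st.2.2.2.2.2.2 || PySem.Str.isIn "balcony" low)

def parse_feature_flags_alt (tags : List String) : List (String × Bool) :=
  let st := tags.foldl pvStep (false, false, false, false, false, false, false)
  [("has_garage", st.1), ("has_fireplace", st.2.1), ("is_renovated", st.2.2.1),
   ("has_smart_home", st.2.2.2.1), ("is_top_floor", st.2.2.2.2.1),
   ("has_sunroom", st.2.2.2.2.2.1), ("has_balcony", st.2.2.2.2.2.2)]

-- ===== PRECONDITION & SPEC =====
def Spec_parse_feature_flags (tags : List String) (out : List (String × Bool)) : Prop := out = parse_feature_flags_alt tags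
instance (tags : List String) (out : List (String × Bool)) : Decidable (Spec_parse_feature_flags tags out) := by unfold Spec_parse_feature_flags; infer_instance

-- ===== CLAIM (what is proved, stated in full; the proofs are below) =====
def Claim_equal_parse_feature_flags : Prop := ∀ (tags : List String), Dom_parse_feature_flags tags → Spec_parse_feature_flags tags (parse_feature_flags tags)

-- ===== LEMMAS AND PROOFS =====
-- loop invariant: after folding pvStep, each component is its start value OR-ed with the any-scan
lemma pvFoldl_step (tags : List String) (st : Bool × Bool × Bool × Bool × Bool × Bool × Bool) :
    tags.foldl pvStep st =
      (st.1 || tags.any (fun t => PySem.Str.isIn "garage" (PySem.Str.lower t)),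
       st.2.1 || tags.any (fun t => PySem.Str.isIn "fireplace" (PySem.Str.lower t)),
       st.2.2.1 || tags.any (fun t => PySem.Str.isIn "renov" (PySem.Str.lower t) || PySem.Str.isIn "upgrade" (PySem.Str.lower t)),
       st.2.2.2.1 || tags.any (fun t => PySem.Str.isIn "smart" (PySem.Str.lower t)),
       st.2.2.2.2.1 || tags.any (fun t => PySem.Str.isIn "top floor" (PySem.Str.lower t)),
       st.2.2.2.2.2.1 || tags.any (fun t => PySem.Str.isIn "sunroom" (PySem.Str.lower t)),
       st.2.2.2.2.2.2 || tags.any (fun t => PySem.Str.isIn "balcony" (PySem.Str.lower t))) := by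
  induction tags generalizing st with
  | nil => simp
  | cons t ts ih => simp [List.foldl_cons, ih, pvStep, Bool.or_assoc]

-- ===== VERDICT (by name: the statement is the Claim_ definition above) =====
theorem parse_feature_flags_spec : Claim_equal_parse_feature_flags := by
  intro tags _
  unfold Spec_parse_feature_flags parse_feature_flags parse_feature_flags_alt
  rw [pvFoldl_step]
  simp [List.any_map, Function.comp_def, PySem.Str.lower]
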